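-- pv_equiv track=rewrite | github.com/nmdp-bioinformatics/py-grimm | gram/source/haplotypes_to_Glstrign.py | gl_cartesian_product
-- ===== SOURCE A (Python) =====
-- import itertools
--
-- def gl_cartesian_product(h1, h2, _alleles_names_):
--     """
--     from two haplotypes, create all options to a gl string (cartesian product)
--     e.g. (with 3 alleles_names, for simplification) hap1: A:[01, 03], B:[02], C:[04]
--                                               hap2: A:[06], B:[07], C:[04, 05]
--          --> 'pairs_in_allele_from_2_haps' of allele_name = A: [01+06, 03+06] (same idea for B, C)
--          --> all_pairs_all_alleles: [[01+06, 03+06], [02+07], [04+04, 04+05]]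
--          --> cartesian_options: [[01+06, 02+07, 04+04], [01+06, 02+07, 04+05], [03+06, 02+07, 04+04], [03+06, 02+07, 04+05]]
--     :param h1: first haplotype
--     :param h2: second haplotype
--     :param _alleles_names_: list of alleles_names names, without the allele with no data in two haplotypes
--     :return: all options to gl string
--     """
--     all_pairs_all_alleles = []
--     cartesian_options = []
--     for allele_name in _alleles_names_:
--         pairs_in_allele_from_2_haps = []
--         for al1 in h1[allele_name]:
--             for al2 in h2[allele_name]:
--                 pairs_in_allele_from_2_haps.append(''.join([str(al1), '+', str(al2)]))
--         all_pairs_all_alleles.append(pairs_in_allele_from_2_haps)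
--     for option in itertools.product(*all_pairs_all_alleles):
--         cartesian_options.append(option)
--
--     return cartesian_options
-- ===== SOURCE B (Python) =====
-- def gl_cartesian_product(h1, h2, _alleles_names_):
--     """Recursive decomposition: build the cartesian product back-to-front,
--     consing each allele's pair strings onto the product of the remaining alleles."""
--     def options_from(names):
--         if not names:
--             return [()]
--         name = names[0]
--         pairs = ['%s+%s' % (a1, a2) for a1 in h1[name] for a2 in h2[name]]
--         rest = options_from(names[1:])
--         return [(p,) + t for p in pairs for t in rest]
--     return options_from(list(_alleles_names_))
-- ===== Notes on version B (the rewrite author's own statement) =====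
-- stated objective: alternative
-- what changed: Replaces A's two-phase design (accumulate per-allele pair lists with nested append loops, then call itertools.product, i.e. a left-to-right iterative product) by a single recursive pass over the allele names that builds the cartesian product back-to-front, consing each allele's pair strings onto the recursively computed product of the remaining alleles.
import Mathlib
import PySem

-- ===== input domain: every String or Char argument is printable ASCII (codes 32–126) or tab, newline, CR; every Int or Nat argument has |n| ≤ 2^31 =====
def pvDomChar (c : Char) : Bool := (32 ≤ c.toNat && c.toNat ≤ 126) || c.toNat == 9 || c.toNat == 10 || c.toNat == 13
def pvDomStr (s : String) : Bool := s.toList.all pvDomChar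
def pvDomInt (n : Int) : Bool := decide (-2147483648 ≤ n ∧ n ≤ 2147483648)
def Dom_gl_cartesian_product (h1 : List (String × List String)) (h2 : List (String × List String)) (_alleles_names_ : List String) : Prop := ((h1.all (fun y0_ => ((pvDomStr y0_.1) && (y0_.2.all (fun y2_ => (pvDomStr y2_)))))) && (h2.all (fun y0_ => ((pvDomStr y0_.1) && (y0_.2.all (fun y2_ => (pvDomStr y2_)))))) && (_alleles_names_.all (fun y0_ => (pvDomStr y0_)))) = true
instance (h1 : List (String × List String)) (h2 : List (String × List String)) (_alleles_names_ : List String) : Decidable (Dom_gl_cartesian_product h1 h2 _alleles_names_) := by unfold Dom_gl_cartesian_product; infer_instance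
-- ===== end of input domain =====

-- ===== PORT A =====
-- B changes the decomposition: A accumulates all per-allele pair lists with nested
-- append loops and then takes an iterative (left-to-right) itertools.product;
-- B is one structural recursion over the allele names building the product back-to-front.
-- itertools.product(*pools), ported exactly as its iterative left-fold semantics
-- (result starts at [()]; each pool extends every tuple on the right).
def pyProduct (pools : List (List String)) : List (List String) :=
  pools.foldl (fun res pool => res.flatMap (fun r => pool.map (fun x => r ++ [x]))) [[]]

-- h[name] on a Python dict: first-match lookup (keys are unique under Pre_);
-- default [] is never reached under Pre_ (KeyError is excluded there).
def pyLookup (h : List (String × List String)) (name : String) : List String :=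
  ((PySem.Dict.mk h).get? name).getD []

def gl_cartesian_product (h1 : List (String × List String)) (h2 : List (String × List String)) (_alleles_names_ : List String) : List (List String) :=
  let all_pairs_all_alleles :=
    _alleles_names_.foldl (fun acc allele_name =>
      let pairs_in_allele_from_2_haps :=
        (pyLookup h1 allele_name).foldl (fun ps al1 =>
          (pyLookup h2 allele_name).foldl (fun ps2 al2 =>
            ps2 ++ [al1 ++ "+" ++ al2]) ps) []
      acc ++ [pairs_in_allele_from_2_haps]) []
  pyProduct all_pairs_all_alleles

-- ===== PORT B =====
def altOptionsFrom (h1 h2 : List (String × List String)) : List String → List (List String)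
  | [] => [[]]
  | name :: names =>
      let pairs := (pyLookup h1 name).flatMap (fun a1 =>
        (pyLookup h2 name).map (fun a2 => a1 ++ "+" ++ a2))
      let rest := altOptionsFrom h1 h2 names
      pairs.flatMap (fun p => rest.map (fun t => p :: t))

def gl_cartesian_product_alt (h1 : List (String × List String)) (h2 : List (String × List String)) (_alleles_names_ : List String) : List (List String) :=
  altOptionsFrom h1 h2 _alleles_names_

-- ===== PRECONDITION & SPEC =====
-- A raises KeyError when some allele name is absent from h1 or h2; and the assoc lists
-- stand for Python dicts, whose keys are unique, so duplicate-key lists are excluded.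
def Pre_gl_cartesian_product (h1 : List (String × List String)) (h2 : List (String × List String)) (_alleles_names_ : List String) : Prop :=
  (h1.map Prod.fst).Nodup ∧ (h2.map Prod.fst).Nodup ∧
  ∀ n ∈ _alleles_names_, ((PySem.Dict.mk h1).contains n = true) ∧ ((PySem.Dict.mk h2).contains n = true)
instance (h1 : List (String × List String)) (h2 : List (String × List String)) (_alleles_names_ : List String) : Decidable (Pre_gl_cartesian_product h1 h2 _alleles_names_) := by unfold Pre_gl_cartesian_product; infer_instance

def pvWitness_gl_cartesian_product : (List (String × List String)) × (List (String × List String)) × List String :=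
  ([("A", ["01", "03"]), ("B", ["02"])], ([("A", ["06"]), ("B", ["07"])], ["A", "B"]))
def Spec_gl_cartesian_product (h1 : List (String × List String)) (h2 : List (String × List String)) (_alleles_names_ : List String) (out : List (List String)) : Prop := out = gl_cartesian_product_alt h1 h2 _alleles_names_
instance (h1 : List (String × List String)) (h2 : List (String × List String)) (_alleles_names_ : List String) (out : List (List String)) : Decidable (Spec_gl_cartesian_product h1 h2 _alleles_names_ out) := by unfold Spec_gl_cartesian_product; infer_instance

-- ===== CLAIM (what is proved, stated in full; the proofs are below) =====
def Claim_equal_gl_cartesian_product : Prop := ∀ (h1 : List (String × List String)) (h2 : List (String × List String)) (_alleles_names_ : List String), Dom_gl_cartesian_product h1 h2 _alleles_names_ → Pre_gl_cartesian_product h1 h2 _alleles_names_ → Spec_gl_cartesian_product h1 h2 _alleles_names_ (gl_cartesian_product h1 h2 _alleles_names_)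


-- ===== LEMMAS AND PROOFS =====
theorem pvWitness_ok : Dom_gl_cartesian_product pvWitness_gl_cartesian_product.1 pvWitness_gl_cartesian_product.2.1 pvWitness_gl_cartesian_product.2.2 ∧ Pre_gl_cartesian_product pvWitness_gl_cartesian_product.1 pvWitness_gl_cartesian_product.2.1 pvWitness_gl_cartesian_product.2.2 := by
  constructor <;> decide

-- A's inner double loop over h2's alleles appended to ps equals ps ++ the flatMap form.
theorem inner_loop_eq (ys : List String) (a1 : String) (ps : List String) :
    ys.foldl (fun ps2 al2 => ps2 ++ [a1 ++ "+" ++ al2]) ps = ps ++ ys.map (fun a2 => a1 ++ "+" ++ a2) := by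
  induction ys generalizing ps with
  | nil => simp
  | cons y ys ih => rw [List.foldl_cons, ih]; simp

theorem pairs_loop_eq (xs ys : List String) (ps : List String) :
    xs.foldl (fun ps al1 => ys.foldl (fun ps2 al2 => ps2 ++ [al1 ++ "+" ++ al2]) ps) ps
      = ps ++ xs.flatMap (fun a1 => ys.map (fun a2 => a1 ++ "+" ++ a2)) := by
  induction xs generalizing ps with
  | nil => simp
  | cons x xs ih =>
      rw [List.foldl_cons, inner_loop_eq, ih]
      simp [List.append_assoc]

-- the left-fold product over any accumulator, characterised by the recursive product
theorem pyProduct_go (pools : List (List String)) (acc : List (List String)) :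
    pools.foldl (fun res pool => res.flatMap (fun r => pool.map (fun x => r ++ [x]))) acc
      = acc.flatMap (fun r =>
          (pools.foldr (fun pool rest => pool.flatMap (fun p => rest.map (fun t => p :: t))) [[]]).map (fun t => r ++ t)) := by
  induction pools generalizing acc with
  | nil => simp
  | cons pool pools ih =>
      rw [List.foldl_cons, ih, List.foldr_cons, List.flatMap_assoc]
      congr 1; funext r
      rw [List.flatMap_map, List.map_flatMap]
      congr 1; funext x
      simp [List.map_map, Function.comp, List.append_assoc]

theorem alt_eq_foldr (h1 h2 : List (String × List String)) (names : List String) :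
    altOptionsFrom h1 h2 names
      = (names.map (fun n => (pyLookup h1 n).flatMap (fun a1 => (pyLookup h2 n).map (fun a2 => a1 ++ "+" ++ a2)))).foldr
          (fun pool rest => pool.flatMap (fun p => rest.map (fun t => p :: t))) [[]] := by
  induction names with
  | nil => rfl
  | cons n ns ih => simp [altOptionsFrom, ih]

theorem allpairs_eq_map (h1 h2 : List (String × List String)) (names : List String) (acc : List (List String)) :
    names.foldl (fun acc allele_name =>
        acc ++ [(pyLookup h1 allele_name).foldl (fun ps al1 =>
          (pyLookup h2 allele_name).foldl (fun ps2 al2 => ps2 ++ [al1 ++ "+" ++ al2]) ps) []]) acc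
      = acc ++ names.map (fun n => (pyLookup h1 n).flatMap (fun a1 => (pyLookup h2 n).map (fun a2 => a1 ++ "+" ++ a2))) := by
  induction names generalizing acc with
  | nil => simp
  | cons n ns ih =>
      rw [List.foldl_cons, pairs_loop_eq, ih]
      simp [List.append_assoc]

-- ===== VERDICT (by name: the statement is the Claim_ definition above) =====
theorem gl_cartesian_product_spec : Claim_equal_gl_cartesian_product := by
  intro h1 h2 names _ _
  unfold Spec_gl_cartesian_product gl_cartesian_product gl_cartesian_product_alt pyProduct
  rw [allpairs_eq_map h1 h2 names [], pyProduct_go, alt_eq_foldr]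
  simp
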